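-- pv_equiv track=rewrite | github.com/GAIR-NLP/InnovatorBench | research_gym/backend/web_server.py | find_link_line_number
-- ===== SOURCE A (Python) =====
-- from typing import Dict, Any, List, Optional
--
-- def find_link_line_number(cached_text: List[str], link_text: str, link_context: str) -> Optional[int]:
--     """Find link line number in text using context for precise location"""
--     if not cached_text or not link_text:
--         return None
--
--     # Find all lines containing link text
--     matching_lines = []
--     for i, line in enumerate(cached_text, 1):
--         if link_text in line:
--             matching_lines.append(i)
--
--     if not matching_lines:
--         return None
--
--     # If only one match, return directly
--     if len(matching_lines) == 1:
--         return matching_lines[0]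
--
--     # If multiple matches, use context information for precise location
--     if link_context and len(link_context.strip()) > len(link_text):
--         for line_num in matching_lines:
--             line = cached_text[line_num - 1]
--             # Check if context matches (compare after removing extra whitespace)
--             line_clean = ' '.join(line.split())
--             context_clean = ' '.join(link_context.split())
--             if context_clean in line_clean or line_clean in context_clean:
--                 return line_num
--
--     # If context can't distinguish, return first match
--     return matching_lines[0]
-- ===== SOURCE B (Python) =====
-- from typing import List, Optional
--
-- def find_link_line_number(cached_text: List[str], link_text: str, link_context: str) -> Optional[int]:
--     """Single pass: track first match, multiplicity, and first context-compatible match."""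
--     if not cached_text or not link_text:
--         return None
--     use_context = bool(link_context) and len(link_context.strip()) > len(link_text)
--     context_clean = ' '.join(link_context.split()) if use_context else ''
--     first = None
--     multi = False
--     ctx_hit = None
--     for i, line in enumerate(cached_text, 1):
--         if link_text in line:
--             if first is None:
--                 first = i
--             else:
--                 multi = True
--             if use_context and ctx_hit is None:
--                 line_clean = ' '.join(line.split())
--                 if context_clean in line_clean or line_clean in context_clean:
--                     ctx_hit = i
--     if first is None:
--         return None
--     if not multi:
--         return first
--     if ctx_hit is not None:
--         return ctx_hit
--     return first
-- ===== Notes on version B (the rewrite author's own statement) =====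
-- stated objective: alternative
-- what changed: Replaces A's two-phase scheme (collect all matching line numbers, then a second loop re-indexing cached_text to test context) by one pass over enumerate(cached_text, 1) that tracks first match, multiplicity flag and first context-compatible match, with context_clean computed once.
import Mathlib
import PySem

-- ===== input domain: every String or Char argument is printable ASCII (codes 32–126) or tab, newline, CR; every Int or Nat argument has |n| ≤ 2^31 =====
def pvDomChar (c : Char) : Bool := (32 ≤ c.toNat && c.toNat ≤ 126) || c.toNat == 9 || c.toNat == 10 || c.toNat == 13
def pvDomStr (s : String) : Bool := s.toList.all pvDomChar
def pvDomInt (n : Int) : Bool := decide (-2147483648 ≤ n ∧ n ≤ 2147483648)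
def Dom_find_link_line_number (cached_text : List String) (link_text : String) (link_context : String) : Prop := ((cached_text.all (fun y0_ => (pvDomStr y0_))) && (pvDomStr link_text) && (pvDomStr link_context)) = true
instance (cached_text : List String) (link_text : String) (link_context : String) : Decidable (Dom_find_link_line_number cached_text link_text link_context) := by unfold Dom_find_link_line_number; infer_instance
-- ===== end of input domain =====

-- B replaces A's two passes (collect matching line numbers, then re-index cached_text to
-- test context) by one pass over enumerate(cached_text, 1); alternative decomposition, same cost.

-- ===== PORT A =====
-- the context loop of A: for line_num in matching_lines: … (cached_text[line_num-1] is always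
-- in range because line numbers come from enumerate; .getD "" is unreachable)
def pvCtxLoopA (cached_text : List String) (link_context : String) : List Int → Option Int
  | [] => none
  | n :: ms =>
    let line := (PySem.List.pyGet? cached_text (n - 1)).getD ""
    let line_clean := PySem.Str.join " " (PySem.Str.split₀ line)
    let context_clean := PySem.Str.join " " (PySem.Str.split₀ link_context)
    if PySem.Str.isIn context_clean line_clean || PySem.Str.isIn line_clean context_clean then
      some n
    else pvCtxLoopA cached_text link_context ms

def find_link_line_number (cached_text : List String) (link_text : String) (link_context : String) : Option Int :=
  if cached_text = [] ∨ link_text = "" then none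
  else
    let matching_lines :=
      (PySem.List.enumerate cached_text 1).foldl
        (fun acc p => if PySem.Str.isIn link_text p.2 then acc ++ [p.1] else acc) []
    if matching_lines = [] then none
    else if matching_lines.length = 1 then some (PySem.List.pyGetD matching_lines 0 0)
    else if link_context ≠ "" ∧ PySem.Str.len (PySem.Str.strip link_context) > PySem.Str.len link_text then
      match pvCtxLoopA cached_text link_context matching_lines with
      | some n => some n
      | none => some (PySem.List.pyGetD matching_lines 0 0)
    else some (PySem.List.pyGetD matching_lines 0 0)

-- ===== PORT B =====
-- the single pass of Source B: state (first, multi, ctx_hit)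
def pvLoopB (link_text : String) (useCtx : Bool) (context_clean : String) :
    List (Int × String) → (Option Int × Bool × Option Int) → (Option Int × Bool × Option Int)
  | [], st => st
  | (i, line) :: rest, (first, multi, ctx_hit) =>
    if PySem.Str.isIn link_text line then
      let first' := if first.isNone then some i else first
      let multi' := if first.isNone then multi else true
      let ctx' :=
        if useCtx && ctx_hit.isNone then
          let line_clean := PySem.Str.join " " (PySem.Str.split₀ line)
          if PySem.Str.isIn context_clean line_clean || PySem.Str.isIn line_clean context_clean then
            some i
          else ctx_hit
        else ctx_hit
      pvLoopB link_text useCtx context_clean rest (first', multi', ctx')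
    else pvLoopB link_text useCtx context_clean rest (first, multi, ctx_hit)

def find_link_line_number_alt (cached_text : List String) (link_text : String) (link_context : String) : Option Int :=
  if cached_text = [] ∨ link_text = "" then none
  else
    let useCtx : Bool := decide (link_context ≠ "" ∧ PySem.Str.len (PySem.Str.strip link_context) > PySem.Str.len link_text)
    let context_clean := if useCtx then PySem.Str.join " " (PySem.Str.split₀ link_context) else ""
    match pvLoopB link_text useCtx context_clean (PySem.List.enumerate cached_text 1) (none, false, none) with
    | (none, _, _) => none
    | (some f, multi, ctx_hit) =>
      if !multi then some f
      else match ctx_hit with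
        | some c => some c
        | none => some f

-- ===== PRECONDITION & SPEC =====
def Spec_find_link_line_number (cached_text : List String) (link_text : String) (link_context : String) (out : Option Int) : Prop := out = find_link_line_number_alt cached_text link_text link_context
instance (cached_text : List String) (link_text : String) (link_context : String) (out : Option Int) : Decidable (Spec_find_link_line_number cached_text link_text link_context out) := by unfold Spec_find_link_line_number; infer_instance

-- ===== CLAIM (what is proved, stated in full; the proofs are below) =====
def Claim_equal_find_link_line_number : Prop := ∀ (cached_text : List String) (link_text : String) (link_context : String), Dom_find_link_line_number cached_text link_text link_context → Spec_find_link_line_number cached_text link_text link_context (find_link_line_number cached_text link_text link_context)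

-- ===== LEMMAS AND PROOFS =====

-- the matching pairs of the enumeration, and the context predicate (proof-side views of both loops)
def pvMatch (link_text : String) (l : List (Int × String)) : List (Int × String) :=
  l.filter (fun p => PySem.Str.isIn link_text p.2)

def pvPred (context_clean : String) (line : String) : Bool :=
  let line_clean := PySem.Str.join " " (PySem.Str.split₀ line)
  PySem.Str.isIn context_clean line_clean || PySem.Str.isIn line_clean context_clean

lemma pvCollectA_eq (link_text : String) (l : List (Int × String)) :
    l.foldl (fun acc p => if PySem.Str.isIn link_text p.2 then acc ++ [p.1] else acc) [] =
      (pvMatch link_text l).map Prod.fst := by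
  rw [PySem.List.foldl_append_if]; simp [pvMatch]

lemma pvMem_enumerate_get (cached_text : List String) (n : Int) (line : String)
    (h : (n, line) ∈ PySem.List.enumerate cached_text 1) :
    (PySem.List.pyGet? cached_text (n - 1)).getD "" = line := by
  rw [PySem.List.mem_enumerate_iff] at h
  obtain ⟨k, hk, hp⟩ := h
  rw [Prod.mk.injEq] at hp
  obtain ⟨rfl, rfl⟩ := hp
  have h1 : (1 : Int) + k - 1 = (k : Int) := by ring
  rw [h1, PySem.List.pyGet?_natCast]
  simp [hk]

-- A's context loop is the first context-compatible matching pair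
lemma pvCtxLoopA_eq (cached_text : List String) (link_context : String)
    (P : List (Int × String)) (hP : ∀ p ∈ P, p ∈ PySem.List.enumerate cached_text 1) :
    pvCtxLoopA cached_text link_context (P.map Prod.fst) =
      (P.find? (fun p => pvPred (PySem.Str.join " " (PySem.Str.split₀ link_context)) p.2)).map Prod.fst := by
  induction P with
  | nil => simp [pvCtxLoopA]
  | cons p P' ih =>
    obtain ⟨n, line⟩ := p
    have hline := pvMem_enumerate_get cached_text n line (hP _ (List.mem_cons_self ..))
    rw [List.map_cons, pvCtxLoopA, hline, List.find?_cons]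
    cases hb : pvPred (PySem.Str.join " " (PySem.Str.split₀ link_context)) line with
    | true => rw [pvPred] at hb; simp only [hb]; simp
    | false =>
      rw [pvPred] at hb
      simp only [hb]
      simp [ih (fun q hq => hP q (List.mem_cons_of_mem _ hq))]

-- B's single pass computes first match, multiplicity and first context hit of the matching pairs
lemma pvLoopB_eq (link_text : String) (u : Bool) (cc : String)
    (l : List (Int × String)) (first : Option Int) (multi : Bool) (ctx : Option Int) :
    pvLoopB link_text u cc l (first, multi, ctx) =
      (first.or (((pvMatch link_text l).map Prod.fst).head?),
       multi || decide ((if first.isSome then 1 else 2) ≤ (pvMatch link_text l).length),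
       if u then ctx.or (((pvMatch link_text l).find? (fun p => pvPred cc p.2)).map Prod.fst) else ctx) := by
  induction l generalizing first multi ctx with
  | nil => cases u <;> cases first <;> simp [pvLoopB, pvMatch]
  | cons p l' ih =>
    obtain ⟨i, line⟩ := p
    cases hm : PySem.Str.isIn link_text line with
    | false =>
      rw [pvLoopB]
      simp only [hm, Bool.false_eq_true, if_false, ih, pvMatch, List.filter_cons]
      rfl
    | true =>
      rw [pvLoopB]
      simp only [hm, if_true, ih, pvMatch, List.filter_cons, List.map_cons, List.length_cons,
        List.find?_cons]
      refine Prod.ext ?_ (Prod.ext ?_ ?_)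
      · cases first <;> simp
      · cases first <;> simp
      · cases u with
        | false => simp
        | true =>
          cases ctx with
          | some c => simp
          | none =>
            cases hb : pvPred cc line with
            | true =>
              rw [pvPred] at hb
              simp only [Bool.true_and, Option.isNone_none, if_true, hb]
              simp
            | false =>
              rw [pvPred] at hb
              simp only [Bool.true_and, Option.isNone_none, if_true, hb]
              simp

-- ===== VERDICT (by name: the statement is the Claim_ definition above) =====
set_option maxHeartbeats 1000000 in
theorem find_link_line_number_spec : Claim_equal_find_link_line_number := by
  intro ct lt lc _
  unfold Spec_find_link_line_number find_link_line_number find_link_line_number_alt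
  by_cases h0 : ct = [] ∨ lt = ""
  · simp [h0]
  · simp only [h0, if_false]
    rw [pvCollectA_eq, pvLoopB_eq]
    have hsub : ∀ p ∈ pvMatch lt (PySem.List.enumerate ct 1), p ∈ PySem.List.enumerate ct 1 := by
      intro p hp
      rw [pvMatch] at hp
      exact List.mem_of_mem_filter hp
    match hM : pvMatch lt (PySem.List.enumerate ct 1) with
    | [] => simp
    | [(n, line)] => simp [PySem.List.pyGetD]
    | (n1, l1) :: (n2, l2) :: rest =>
      simp only [List.map_cons, List.length_cons, if_false, List.head?_cons,
        Option.isSome_none, reduceCtorEq]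
      by_cases hcond : lc ≠ "" ∧ PySem.Str.len (PySem.Str.strip lc) > PySem.Str.len lt
      · rw [if_pos hcond]
        have hu : decide (lc ≠ "" ∧ PySem.Str.len (PySem.Str.strip lc) > PySem.Str.len lt) = true := by
          simp only [decide_eq_true_iff]; exact hcond
        rw [hu]
        have hloop := pvCtxLoopA_eq ct lc ((n1, l1) :: (n2, l2) :: rest) (hM ▸ hsub)
        simp only [List.map_cons] at hloop
        rw [hloop]
        simp only [reduceIte]
        cases hf : ((n1, l1) :: (n2, l2) :: rest).find?
            (fun p => pvPred (PySem.Str.join " " (PySem.Str.split₀ lc)) p.2) with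
        | some q => simp
        | none => simp [PySem.List.pyGetD]
      · rw [if_neg hcond]
        have hu : decide (lc ≠ "" ∧ PySem.Str.len (PySem.Str.strip lc) > PySem.Str.len lt) = false := by
          simp only [decide_eq_false_iff_not]; exact hcond
        rw [hu]
        simp [PySem.List.pyGetD]
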